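-- pv_equiv track=rewrite | github.com/jerryli27/eecs370_facial_exp_project | facial_landmark_util.py | get_largest_face_index
-- ===== SOURCE A (Python) =====
-- def get_largest_face_index(face_coordinates):
--     """
--
--     :param face_coordinates: a list of (x, y, w, h), comes from calling get_features()
--     :return: the index of the largest face.
--     """
--     if len(face_coordinates) == 0:
--         raise AttributeError("You must feed in at least one set of face coordinates to get_largest_face_index().")
--     ret = -1
--     max_face_area = 0
--     for i in range(len(face_coordinates)):
--         face_area = abs(face_coordinates[i][2] - face_coordinates[i][0]) * abs(face_coordinates[i][3] - face_coordinates[i][1])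
--         if face_area > max_face_area:
--             ret = i
--             max_face_area = face_area
--     if ret < 0:
--         raise AttributeError("face coordinate areas should be larger than 0! No such face area found in %s"
--                              %(str(face_coordinates)))
--     return ret
-- ===== SOURCE B (Python) =====
-- def get_largest_face_index(face_coordinates):
--     if len(face_coordinates) == 0:
--         raise AttributeError("You must feed in at least one set of face coordinates to get_largest_face_index().")
--     areas = [abs(c[2] - c[0]) * abs(c[3] - c[1]) for c in face_coordinates]
--     m = max(areas)
--     if m <= 0:
--         raise AttributeError("face coordinate areas should be larger than 0! No such face area found in %s"
--                              % (str(face_coordinates)))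
--     return areas.index(m)
-- ===== Notes on version B (the rewrite author's own statement) =====
-- stated objective: simpler
-- what changed: Replaces the incremental argmax scan with running (ret, max_face_area) state by a build-table/reduce/locate decomposition: a comprehension of areas, max(), and areas.index() for the earliest maximal index.
import Mathlib
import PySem

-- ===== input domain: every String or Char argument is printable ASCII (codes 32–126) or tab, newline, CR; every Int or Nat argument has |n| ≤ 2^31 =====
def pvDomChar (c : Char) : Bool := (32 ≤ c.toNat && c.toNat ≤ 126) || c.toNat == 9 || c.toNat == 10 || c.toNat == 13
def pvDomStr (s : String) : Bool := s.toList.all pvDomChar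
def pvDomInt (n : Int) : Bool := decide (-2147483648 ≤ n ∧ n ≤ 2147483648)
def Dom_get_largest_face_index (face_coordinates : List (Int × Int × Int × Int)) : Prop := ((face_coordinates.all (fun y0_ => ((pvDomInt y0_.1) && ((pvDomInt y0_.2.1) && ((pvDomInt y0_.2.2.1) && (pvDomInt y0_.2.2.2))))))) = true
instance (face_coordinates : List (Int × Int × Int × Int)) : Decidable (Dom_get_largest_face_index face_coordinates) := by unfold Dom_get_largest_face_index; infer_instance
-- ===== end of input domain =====

-- B replaces A's incremental argmax state machine by areas-table + max + first-index lookup (objective: simpler).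

-- ===== PORT A =====
-- literal port: loop over range(len) with running (ret, max_face_area); -1 on the two raise paths (excluded by Pre_)
def get_largest_face_index (face_coordinates : List (Int × Int × Int × Int)) : Int :=
  if face_coordinates.length = 0 then -1  -- raise AttributeError
  else
    let res := (PySem.List.pyRange 0 face_coordinates.length 1).foldl
      (fun (st : Int × Int) i =>
        let c := PySem.List.pyGetD face_coordinates i (0, 0, 0, 0)
        let face_area := |c.2.2.1 - c.1| * |c.2.2.2 - c.2.1|
        if st.2 < face_area then (i, face_area) else st)
      (-1, 0)
    if res.1 < 0 then -1  -- raise AttributeError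
    else res.1

-- ===== PORT B =====
def pyArea (c : Int × Int × Int × Int) : Int := |c.2.2.1 - c.1| * |c.2.2.2 - c.2.1|

def get_largest_face_index_alt (face_coordinates : List (Int × Int × Int × Int)) : Int :=
  if face_coordinates.length = 0 then -1  -- raise AttributeError
  else
    let areas := face_coordinates.map pyArea
    match PySem.List.max? areas (fun x => x) with
    | none => -1
    | some m =>
      if m ≤ 0 then -1  -- raise AttributeError
      else
        match PySem.List.index? areas m with
        | some j => (j : Int)
        | none => -1

-- ===== PRECONDITION & SPEC =====
-- Pre_ = exactly where Python A returns: the list is nonempty and some face has strictly positive area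
-- (A raises AttributeError on the empty list and when every area is 0; B raises the same exceptions there).
def Pre_get_largest_face_index (face_coordinates : List (Int × Int × Int × Int)) : Prop :=
  face_coordinates ≠ [] ∧
  ∃ c ∈ face_coordinates, 0 < |c.2.2.1 - c.1| * |c.2.2.2 - c.2.1|
instance (face_coordinates : List (Int × Int × Int × Int)) : Decidable (Pre_get_largest_face_index face_coordinates) := by unfold Pre_get_largest_face_index; infer_instance

def pvWitness_get_largest_face_index : (List (Int × Int × Int × Int)) := [(0, 0, 2, 3), (1, 1, 1, 1)]

def Spec_get_largest_face_index (face_coordinates : List (Int × Int × Int × Int)) (out : Int) : Prop := out = get_largest_face_index_alt face_coordinates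
instance (face_coordinates : List (Int × Int × Int × Int)) (out : Int) : Decidable (Spec_get_largest_face_index face_coordinates out) := by unfold Spec_get_largest_face_index; infer_instance

-- ===== CLAIM (what is proved, stated in full; the proofs are below) =====
def Claim_equal_get_largest_face_index : Prop := ∀ (face_coordinates : List (Int × Int × Int × Int)), Dom_get_largest_face_index face_coordinates → Pre_get_largest_face_index face_coordinates → Spec_get_largest_face_index face_coordinates (get_largest_face_index face_coordinates)

-- ===== LEMMAS AND PROOFS =====

-- proof-only model of A's loop: process the area list with an explicit index counter
def loopE (as : List Int) (k : Int) (st : Int × Int) : Int × Int :=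
  match as with
  | [] => st
  | a :: rest => loopE rest (k + 1) (if st.2 < a then (k, a) else st)

-- A's pyRange/pyGetD fold equals loopE over the mapped area list
lemma bridgeA (fc : List (Int × Int × Int × Int)) :
    ∀ (n k : ℕ) (st : Int × Int), k + n = fc.length →
    (PySem.List.pyRange (k : Int) (fc.length : Int) 1).foldl
      (fun (st : Int × Int) i =>
        let c := PySem.List.pyGetD fc i (0, 0, 0, 0)
        let face_area := |c.2.2.1 - c.1| * |c.2.2.2 - c.2.1|
        if st.2 < face_area then (i, face_area) else st) st
      = loopE ((fc.drop k).map pyArea) (k : Int) st := by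
  intro n
  induction n with
  | zero =>
    intro k st hk
    have h1 : (fc.length : Int) ≤ (k : Int) := by omega
    rw [PySem.List.pyRange_one_eq_nil h1]
    have : fc.drop k = [] := List.drop_eq_nil_of_le (by omega)
    simp [this, loopE]
  | succ n ih =>
    intro k st hk
    have hk' : k < fc.length := by omega
    have h1 : (k : Int) < (fc.length : Int) := by exact_mod_cast hk'
    rw [PySem.List.pyRange_one_cons h1]
    have hdrop : fc.drop k = fc[k] :: fc.drop (k + 1) := List.drop_eq_getElem_cons hk'
    have hget : PySem.List.pyGetD fc (k : Int) (0, 0, 0, 0) = fc[k] := by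
      rw [PySem.List.pyGetD_natCast]
      simp [List.getD, List.getElem?_eq_getElem hk']
    simp only [List.foldl_cons, hget]
    have : ((k : Int) + 1) = ((k + 1 : ℕ) : Int) := by push_cast; ring
    rw [this, ih (k + 1) _ (by omega)]
    simp only [hdrop, List.map_cons, loopE, pyArea]
    norm_cast

lemma loopE_all_le (as : List Int) : ∀ (k r m : Int), (∀ a ∈ as, a ≤ m) → loopE as k (r, m) = (r, m) := by
  induction as with
  | nil => intro k r m _; rfl
  | cons a rest ih =>
    intro k r m h
    have ha : ¬ m < a := not_lt.mpr (h a (by simp))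
    simp only [loopE, ha, if_false]
    exact ih (k + 1) r m (fun b hb => h b (by simp [hb]))

lemma foldl_max_all_le (as : List Int) : ∀ (m : Int), (∀ a ∈ as, a ≤ m) → as.foldl max m = m := by
  induction as with
  | nil => intro m _; rfl
  | cons a rest ih =>
    intro m h
    have : max m a = m := max_eq_left (h a (by simp))
    simp only [List.foldl_cons, this]
    exact ih m (fun b hb => h b (by simp [hb]))

lemma loopE_spec (as : List Int) : ∀ (k r m : Int), (∃ a ∈ as, m < a) →
    ∃ j : ℕ, PySem.List.index? as (as.foldl max m) = some j ∧
      loopE as k (r, m) = ((k : Int) + (j : Int), as.foldl max m) := by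
  induction as with
  | nil => intro k r m h; simp at h
  | cons a rest ih =>
    intro k r m ⟨x, hx, hmx⟩
    by_cases h : m < a
    · simp only [loopE, h, if_true]
      by_cases hr : ∃ b ∈ rest, a < b
      · obtain ⟨j, hj, hl⟩ := ih (k + 1) k a hr
        obtain ⟨b, hb, hab⟩ := hr
        have hbM : b ≤ rest.foldl max a := (PySem.List.le_foldl_max rest a).2 b hb
        have haM : a < rest.foldl max a := lt_of_lt_of_le hab hbM
        have hma : max m a = a := max_eq_right (le_of_lt h)
        refine ⟨j + 1, ?_, ?_⟩
        · rw [List.foldl_cons, hma,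
            PySem.List.index?_cons_of_ne rest (show a ≠ rest.foldl max a by omega), hj]
          rfl
        · rw [List.foldl_cons, hma, hl]
          have hc : k + 1 + (j : Int) = k + ((j + 1 : ℕ) : Int) := by push_cast; ring
          rw [hc]
      · push Not at hr
        have hma : max m a = a := max_eq_right (le_of_lt h)
        have hfold : rest.foldl max a = a := foldl_max_all_le rest a hr
        refine ⟨0, ?_, ?_⟩
        · rw [List.foldl_cons, hma, hfold]
          exact PySem.List.index?_cons_self a rest
        · rw [List.foldl_cons, hma, hfold, loopE_all_le rest (k + 1) k a hr]
          simp
    · push Not at h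
      have hxr : x ∈ rest := by
        rcases List.mem_cons.mp hx with h1 | h1
        · exact absurd hmx (by rw [h1]; exact not_lt.mpr h)
        · exact h1
      obtain ⟨j, hj, hl⟩ := ih (k + 1) r m ⟨x, hxr, hmx⟩
      have hma : max m a = m := max_eq_left h
      have hxM : x ≤ rest.foldl max m := (PySem.List.le_foldl_max rest m).2 x hxr
      have haM : a < rest.foldl max m := lt_of_le_of_lt h (lt_of_lt_of_le hmx hxM)
      refine ⟨j + 1, ?_, ?_⟩
      · rw [List.foldl_cons, hma,
          PySem.List.index?_cons_of_ne rest (show a ≠ rest.foldl max m by omega), hj]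
        rfl
      · simp only [loopE]
        rw [if_neg (not_lt.mpr h), List.foldl_cons, hma, hl]
        have hc : k + 1 + (j : Int) = k + ((j + 1 : ℕ) : Int) := by push_cast; ring
        rw [hc]

-- ===== VERDICT (by name: the statement is the Claim_ definition above) =====
theorem get_largest_face_index_spec : Claim_equal_get_largest_face_index := by
  intro fc _ ⟨hne, c, hc, hcpos⟩
  unfold Spec_get_largest_face_index get_largest_face_index get_largest_face_index_alt
  have hlen : fc.length ≠ 0 := by simpa [List.length_eq_zero_iff] using hne
  simp only [hlen, if_false]
  set areas := fc.map pyArea with hareas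
  have hmem : pyArea c ∈ areas := List.mem_map_of_mem hc
  have hpos : 0 < pyArea c := hcpos
  have hbr := bridgeA fc fc.length 0 (-1, 0) (by omega)
  simp only [List.drop_zero, Nat.cast_zero] at hbr
  obtain ⟨j, hj, hl⟩ := loopE_spec areas 0 (-1) 0 ⟨pyArea c, hmem, hpos⟩
  -- max? = foldl max
  obtain ⟨a0, t0, hcons⟩ : ∃ a0 t0, areas = a0 :: t0 := by
    cases hA : areas with
    | nil => exact absurd (hA ▸ hmem) (by simp)
    | cons a0 t0 => exact ⟨a0, t0, rfl⟩
  have hmax : PySem.List.max? areas (fun x => x) = some (t0.foldl max a0) := by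
    rw [hcons]; exact PySem.List.max?_id_cons a0 t0
  have hM0 : areas.foldl max 0 = t0.foldl max a0 := by
    have h0a : (0 : Int) ≤ a0 := by
      have ha0 : a0 ∈ areas := by rw [hcons]; simp
      obtain ⟨c0, _, hc0⟩ := List.mem_map.mp ha0
      rw [← hc0]
      exact mul_nonneg (abs_nonneg _) (abs_nonneg _)
    rw [hcons]
    simp only [List.foldl_cons]
    rw [show max (0 : Int) a0 = a0 from max_eq_right h0a]
  have hMpos : 0 < areas.foldl max 0 := lt_of_lt_of_le hpos ((PySem.List.le_foldl_max areas 0).2 _ hmem)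
  rw [hbr, hl]
  simp only [hmax]
  rw [← hM0]
  have : ¬ areas.foldl max 0 ≤ 0 := not_le.mpr hMpos
  simp only [this, if_false]
  rw [hM0] at hj
  rw [← hM0] at hj
  rw [hj]
  simp
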